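-- pv_equiv track=rewrite | github.com/Mic92/dotfiles | pkgs/crabfit-cli/crabfit_cli.py | _group_slots_by_count
-- ===== SOURCE A (Python) =====
-- def _group_slots_by_count(
--     availability_map: dict[str, list[str]],
-- ) -> dict[int, list[str]]:
--     """Group time slots by number of people available.
--
--     Args:
--         availability_map: Map of slot -> list of names.
--
--     Returns:
--         Map of count -> list of slots with that count.
--
--     """
--     slots_by_count: dict[int, list[str]] = {}
--     for slot, available_names in availability_map.items():
--         count = len(available_names)
--         if count not in slots_by_count:
--             slots_by_count[count] = []
--         slots_by_count[count].append(slot)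
--     return slots_by_count
-- ===== SOURCE B (Python) =====
-- def _group_slots_by_count(
--     availability_map: dict[str, list[str]],
-- ) -> dict[int, list[str]]:
--     """Group time slots by number of people available (two-pass version)."""
--     pairs = [(slot, len(names)) for slot, names in availability_map.items()]
--     counts = list(dict.fromkeys(c for _, c in pairs))
--     return {c: [s for s, c2 in pairs if c2 == c] for c in counts}
-- ===== Notes on version B (the rewrite author's own statement) =====
-- stated objective: alternative
-- what changed: Replaces the single dict-building pass (membership test, conditional insert, in-place append) with a two-pass decomposition: precompute (slot, count) pairs, dedupe the counts in first-seen order via dict.fromkeys, then build each bucket with a filtering comprehension over the pairs.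
import Mathlib
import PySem

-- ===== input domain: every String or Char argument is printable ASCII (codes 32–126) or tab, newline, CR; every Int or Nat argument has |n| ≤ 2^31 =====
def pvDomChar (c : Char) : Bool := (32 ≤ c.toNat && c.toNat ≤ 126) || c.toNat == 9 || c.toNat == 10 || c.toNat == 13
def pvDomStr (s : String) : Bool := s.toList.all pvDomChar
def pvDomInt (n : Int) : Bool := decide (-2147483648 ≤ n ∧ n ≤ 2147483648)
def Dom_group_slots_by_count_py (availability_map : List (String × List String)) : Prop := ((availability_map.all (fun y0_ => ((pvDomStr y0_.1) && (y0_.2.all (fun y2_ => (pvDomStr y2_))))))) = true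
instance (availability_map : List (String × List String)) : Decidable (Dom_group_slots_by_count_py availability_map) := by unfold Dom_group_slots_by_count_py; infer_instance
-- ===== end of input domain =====

-- B replaces A's one-pass dict construction by a two-pass build (dedup the counts, then
-- filter the pairs per count); alternative decomposition, same result.

-- ===== PORT A =====
-- literal port of A: one loop, conditional insert of [], then append to the bucket
def group_slots_by_count_py (availability_map : List (String × List String)) : List (Int × List String) :=
  (availability_map.foldl
    (fun (d : PySem.Dict Int (List String)) sc =>
      let count : Int := sc.2.length
      let d := if d.contains count then d else d.insert count []
      d.insert count (d.getD count [] ++ [sc.1]))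
    PySem.Dict.empty).items

-- ===== PORT B =====
def group_slots_by_count_py_alt (availability_map : List (String × List String)) : List (Int × List String) :=
  let pairs := availability_map.map (fun sc => (sc.1, (sc.2.length : Int)))
  let counts := PySem.List.dedup (pairs.map (·.2))
  counts.map (fun c => (c, (pairs.filter (fun p => p.2 == c)).map (·.1)))

-- ===== PRECONDITION & SPEC =====
def Spec_group_slots_by_count_py (availability_map : List (String × List String)) (out : List (Int × List String)) : Prop := out = group_slots_by_count_py_alt availability_map
instance (availability_map : List (String × List String)) (out : List (Int × List String)) : Decidable (Spec_group_slots_by_count_py availability_map out) := by unfold Spec_group_slots_by_count_py; infer_instance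

-- ===== CLAIM (what is proved, stated in full; the proofs are below) =====
def Claim_equal_group_slots_by_count_py : Prop := ∀ (availability_map : List (String × List String)), Dom_group_slots_by_count_py availability_map → Spec_group_slots_by_count_py availability_map (group_slots_by_count_py availability_map)

-- ===== LEMMAS AND PROOFS =====

-- A's loop body (conditional insert of [] then append) is exactly Dict.modify
theorem pv_step_eq_modify (d : PySem.Dict Int (List String)) (sc : String × List String) :
    (let count : Int := sc.2.length
     let d' := if d.contains count then d else d.insert count []
     d'.insert count (d'.getD count [] ++ [sc.1]))
    = d.modify ((sc.2.length : Int)) [] (· ++ [sc.1]) := by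
  by_cases h : d.contains ((sc.2.length : Int))
  · simp only [h, if_pos, PySem.Dict.modify]
  · have h' : d.contains ((sc.2.length : Int)) = false := by
      cases hc : d.contains ((sc.2.length : Int)) <;> simp [hc] at h ⊢
    simp only [h', Bool.false_eq_true, if_neg, not_false_iff, PySem.Dict.modify,
      PySem.Dict.insert_insert_self, PySem.Dict.getD_insert_self,
      PySem.Dict.getD_of_not_contains d ([] : List String) h']

theorem group_slots_by_count_py_spec' (availability_map : List (String × List String)) :
    group_slots_by_count_py availability_map = group_slots_by_count_py_alt availability_map := by
  unfold group_slots_by_count_py group_slots_by_count_py_alt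
  have hstep : (fun (d : PySem.Dict Int (List String)) (sc : String × List String) =>
      let count : Int := sc.2.length
      let d' := if d.contains count then d else d.insert count []
      d'.insert count (d'.getD count [] ++ [sc.1]))
    = (fun (d : PySem.Dict Int (List String)) sc => d.modify ((sc.2.length : Int)) [] (· ++ [sc.1])) :=
    funext fun d => funext fun sc => pv_step_eq_modify d sc
  rw [hstep]
  -- rewrite the fold over the map of pairs
  have hfold : availability_map.foldl
      (fun (d : PySem.Dict Int (List String)) sc => d.modify ((sc.2.length : Int)) [] (· ++ [sc.1]))
      PySem.Dict.empty
    = (availability_map.map (fun sc => ((sc.2.length : Int), sc.1))).foldl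
      (fun (d : PySem.Dict Int (List String)) p => d.modify p.1 [] (· ++ [p.2]))
      PySem.Dict.empty := by
    rw [List.foldl_map]
  rw [hfold]
  set l := availability_map.map (fun sc => ((sc.2.length : Int), sc.1)) with hl
  set F := l.foldl (fun (d : PySem.Dict Int (List String)) p => d.modify p.1 [] (· ++ [p.2])) PySem.Dict.empty with hF
  have hnodup : F.keys.Nodup := by
    rw [hF]
    exact PySem.Dict.nodup_keys_foldl_modify_key l (·.1) [] (fun d p => (· ++ [p.2])) _ PySem.Dict.nodup_keys_empty
  have hkeys : F.keys = PySem.List.dedup (l.map (·.1)) := by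
    rw [hF, PySem.Dict.keys_foldl_modify_key, PySem.List.dedup_eq_ofList]
    simp [PySem.Dict.keys, PySem.Dict.empty, PySem.Set.update, PySem.Set.ofList_eq_foldl]
  have hitems : F.items = F.keys.map (fun k => (k, F.getD k [])) :=
    PySem.Dict.items_eq_map_keys F hnodup []
  rw [hitems, hkeys]
  have hcounts : l.map (·.1)
      = (availability_map.map (fun sc => (sc.1, (sc.2.length : Int)))).map (·.2) := by
    simp [hl, List.map_map, Function.comp]
  rw [hcounts]
  apply List.map_congr_left
  intro c _
  congr 1
  rw [hF, PySem.Dict.getD_foldl_modify_append]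
  simp [hl, PySem.Dict.getD_empty, List.filter_map, List.map_map, Function.comp_def]

-- ===== VERDICT (by name: the statement is the Claim_ definition above) =====
theorem group_slots_by_count_py_spec : Claim_equal_group_slots_by_count_py := by
  intro m _
  exact group_slots_by_count_py_spec' m
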